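-- pv_equiv track=rewrite | github.com/malimalimeow/practice | practice/2026-02-19/Sliding_Window_Multiple_Constraints_Edge_Cases.py | sliding_multi
-- ===== SOURCE A (Python) =====
-- def sliding_multi(s,k,m,target_sum,t):
--     ascii_count=0
--     max_len=0
--     left=0
--     count={}
--     repeat=1
--     new_left=0
--
--
--     for right in range(len(s)):
--         count[s[right]]=count.get(s[right],0)+1
--         ascii_count+=ord(s[right])
--
--         if right>0 and s[right]==s[right-1]:
--             repeat+=1
--
--         else:
--             repeat=1
--
--         if repeat>t:
--             new_left=right-t+1
--             while left< new_left:
--                 count[s[left]]-=1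
--                 ascii_count-=ord(s[left])
--
--                 if count[s[left]]==0:
--                     del count[s[left]]
--
--                 left+=1
--
--
--
--         while ascii_count>target_sum or len(count)>k or count.get(s[right], 0)>m :
--
--             count[s[left]]-=1
--             ascii_count-=ord(s[left])
--
--             if count[s[left]]==0:
--                 del count[s[left]]
--
--             left+=1
--
--
--         max_len=max(max_len,right-left+1)
--
--     return max_len
-- ===== SOURCE B (Python) =====
-- def sliding_multi(s,k,m,target_sum,t):
--     # Brute force: for each start l, extend r with a fresh counter and break at the
--     # first violated constraint (all four constraints only get worse as r grows).
--     n=len(s)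
--     best=0
--     for l in range(n):
--         count={}
--         total=0
--         run=0
--         for r in range(l,n):
--             c=s[r]
--             count[c]=count.get(c,0)+1
--             total+=ord(c)
--             run=run+1 if r>l and s[r]==s[r-1] else 1
--             if total>target_sum or len(count)>k or count[c]>m or run>t:
--                 break
--             best=max(best,r-l+1)
--     return best
-- ===== Notes on version B (the rewrite author's own statement) =====
-- stated objective: simpler
-- what changed: Replaces the amortized O(n) two-pointer sliding window (shared dict with deletions, a run-based jump pop and a shrink loop) by a plain O(n^2) brute-force scan: for each start index a fresh counter is extended rightwards and the inner loop breaks at the first violated constraint.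
import Mathlib
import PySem

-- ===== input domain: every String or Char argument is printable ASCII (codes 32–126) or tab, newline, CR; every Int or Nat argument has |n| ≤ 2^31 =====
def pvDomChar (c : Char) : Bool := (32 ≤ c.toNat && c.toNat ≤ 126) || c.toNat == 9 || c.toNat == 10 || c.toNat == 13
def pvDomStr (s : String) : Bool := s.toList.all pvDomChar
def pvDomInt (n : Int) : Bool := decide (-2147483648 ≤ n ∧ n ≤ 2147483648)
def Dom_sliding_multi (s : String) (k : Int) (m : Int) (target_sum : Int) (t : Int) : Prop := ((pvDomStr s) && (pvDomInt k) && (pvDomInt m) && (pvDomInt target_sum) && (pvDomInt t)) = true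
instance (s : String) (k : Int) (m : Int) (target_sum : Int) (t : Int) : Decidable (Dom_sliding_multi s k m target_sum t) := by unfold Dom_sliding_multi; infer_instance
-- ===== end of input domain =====

-- B replaces A's O(n) two-pointer sliding window by a plainly simpler O(n^2) brute-force
-- scan (fresh counter per start index, break at the first violated constraint).

-- ===== PORT A =====
-- the shared pop body of A's two inner while loops:
--   count[s[left]] -= 1; ascii_count -= ord(s[left]); if count[s[left]]==0: del count[s[left]]; left += 1
def slidePop (cs : List Char) (st : PySem.Dict Char Int × Int × Int) : PySem.Dict Char Int × Int × Int :=
  let c := (PySem.List.pyGet? cs st.2.2).getD ' '   -- s[left]; always in range on Pre_ inputs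
  let count := st.1.modify c 0 (· - 1)
  let ascii := st.2.1 - (c.toNat : Int)
  let count := if count.getD c 0 == 0 then count.erase c else count
  (count, ascii, st.2.2 + 1)

-- 'while left < new_left: <pop>' — fuel is the exact iteration count (new_left - left).toNat
def slideRunPop (cs : List Char) (new_left : Int) : Nat → (PySem.Dict Char Int × Int × Int) → (PySem.Dict Char Int × Int × Int)
  | 0, st => st
  | fuel + 1, st => if st.2.2 < new_left then slideRunPop cs new_left fuel (slidePop cs st) else st

-- 'while ascii_count>target_sum or len(count)>k or count.get(s[right],0)>m: <pop>'
-- (fuel cs.length + 1 always suffices on Pre_ inputs: left stops by the time the window is empty)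
def slideShrink (cs : List Char) (k m target_sum : Int) (c : Char) : Nat → (PySem.Dict Char Int × Int × Int) → (PySem.Dict Char Int × Int × Int)
  | 0, st => st
  | fuel + 1, st =>
    if target_sum < st.2.1 ∨ k < (st.1.size : Int) ∨ m < st.1.getD c 0 then
      slideShrink cs k m target_sum c fuel (slidePop cs st)
    else st

def sliding_multi (s : String) (k : Int) (m : Int) (target_sum : Int) (t : Int) : Int :=
  let cs := s.toList
  let st := (List.range cs.length).foldl (fun st right =>
    let (count, ascii, left, rep, max_len) := st
    let c := cs.getD right ' '
    let count := count.insert c (count.getD c 0 + 1)        -- count[s[right]] = count.get(s[right],0)+1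
    let ascii := ascii + (c.toNat : Int)                    -- ascii_count += ord(s[right])
    let rep := if 0 < right ∧ cs.getD (right - 1) ' ' = c then rep + 1 else 1
    let (count, ascii, left) :=
      if t < rep then                                       -- if repeat > t: pop until left == new_left
        let new_left : Int := (right : Int) - t + 1
        slideRunPop cs new_left (new_left - left).toNat (count, ascii, left)
      else (count, ascii, left)
    let (count, ascii, left) := slideShrink cs k m target_sum c (cs.length + 1) (count, ascii, left)
    (count, ascii, left, rep, max max_len ((right : Int) - left + 1)))
    (PySem.Dict.empty, 0, 0, 1, 0)
  st.2.2.2.2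

-- ===== PORT B =====
-- inner loop of B: 'for r in range(l, n): … break' with its fresh count/total/run state
def slideTry (cs : List Char) (k m target_sum t : Int) (l : Nat) :
    List Nat → PySem.Dict Char Int → Int → Int → Int → Int
  | [], _, _, _, best => best
  | r :: rs, count, total, run, best =>
    let c := cs.getD r ' '
    let count := count.insert c (count.getD c 0 + 1)
    let total := total + (c.toNat : Int)
    let run := if l < r ∧ cs.getD (r - 1) ' ' = c then run + 1 else 1
    if target_sum < total ∨ k < (count.size : Int) ∨ m < count.getD c 0 ∨ t < run then best
    else slideTry cs k m target_sum t l rs count total run (max best ((r : Int) - (l : Int) + 1))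

def sliding_multi_alt (s : String) (k : Int) (m : Int) (target_sum : Int) (t : Int) : Int :=
  let cs := s.toList
  (List.range cs.length).foldl
    (fun best l => slideTry cs k m target_sum t l (List.range' l (cs.length - l)) PySem.Dict.empty 0 0 best) 0

-- ===== PRECONDITION & SPEC =====
-- Pre_ excludes exactly the inputs on which A raises (KeyError/IndexError while popping past
-- the empty window): a non-empty s together with a negative k, m, target_sum or t.
def Pre_sliding_multi (s : String) (k : Int) (m : Int) (target_sum : Int) (t : Int) : Prop :=
  s = "" ∨ (0 ≤ k ∧ 0 ≤ m ∧ 0 ≤ target_sum ∧ 0 ≤ t)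
instance (s : String) (k : Int) (m : Int) (target_sum : Int) (t : Int) : Decidable (Pre_sliding_multi s k m target_sum t) := by unfold Pre_sliding_multi; infer_instance
def pvWitness_sliding_multi : String × Int × Int × Int × Int := ("abca", 2, 2, 1000, 2)

def Spec_sliding_multi (s : String) (k : Int) (m : Int) (target_sum : Int) (t : Int) (out : Int) : Prop := out = sliding_multi_alt s k m target_sum t
instance (s : String) (k : Int) (m : Int) (target_sum : Int) (t : Int) (out : Int) : Decidable (Spec_sliding_multi s k m target_sum t out) := by unfold Spec_sliding_multi; infer_instance

-- ===== CLAIM (what is proved, stated in full; the proofs are below) =====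
def Claim_equal_sliding_multi : Prop := ∀ (s : String) (k : Int) (m : Int) (target_sum : Int) (t : Int), Dom_sliding_multi s k m target_sum t → Pre_sliding_multi s k m target_sum t → Spec_sliding_multi s k m target_sum t (sliding_multi s k m target_sum t)
-- ===== LEMMAS AND PROOFS =====

-- window [l, r) of cs, its character total, its run lengths, the (in)validity predicates
def pvW (cs : List Char) (l r : Nat) : List Char := (cs.drop l).take (r - l)
def pvTot (cs : List Char) (l r : Nat) : Int := ((pvW cs l r).map (fun c => (c.toNat : Int))).sum
def pvRun (cs : List Char) : Nat → Nat
  | 0 => 1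
  | r + 1 => if cs.getD r ' ' = cs.getD (r + 1) ' ' then pvRun cs r + 1 else 1
-- pvBad l r: appending index r to window [l, r) violates one of the four constraints
def pvBad (cs : List Char) (k m target t : Int) (l r : Nat) : Bool :=
  decide (target < pvTot cs l (r + 1)
    ∨ k < ((pvW cs l (r + 1)).toFinset.card : Int)
    ∨ m < ((pvW cs l (r + 1)).count (cs.getD r ' ') : Int)
    ∨ t < ((min (pvRun cs r) (r + 1 - l) : Nat) : Int))
def pvValid (cs : List Char) (k m target t : Int) (l r : Nat) : Prop :=
  ∀ p < r, l ≤ p → pvBad cs k m target t l p = false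
-- least valid left end for the (exclusive-right) window ending at r
@[reducible] def pvValidDec (cs : List Char) (k m target t : Int) (r : Nat) :
    DecidablePred (fun l => pvValid cs k m target t l r) :=
  fun _ => by unfold pvValid; infer_instance
def pvLx (cs : List Char) (k m target t : Int) (r : Nat) : Nat :=
  @Nat.find (fun l => pvValid cs k m target t l r) (pvValidDec cs k m target t r)
    ⟨r, fun p hp hl => absurd hl (by omega)⟩
-- A's max_len after processing right = 0 .. r-1
def pvMlA (cs : List Char) (k m target t : Int) (r : Nat) : Int :=
  (List.range r).foldl (fun a (p : Nat) => max a ((p : Int) + 1 - (pvLx cs k m target t (p + 1) : Int))) 0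
-- best window length continuing from position r with start l (0 if none)
def pvReach (cs : List Char) (k m target t : Int) (l r : Nat) : Int :=
  if _h : r < cs.length then
    if pvBad cs k m target t l r then 0
    else max ((r : Int) + 1 - (l : Int)) (pvReach cs k m target t l (r + 1))
  else 0
termination_by cs.length - r
decreasing_by omega
-- observational description of both programs' count dicts
def pvDictOK (d : PySem.Dict Char Int) (w : List Char) : Prop :=
  d.keys.Nodup ∧ (∀ c, d.getD c 0 = (w.count c : Int)) ∧ (∀ c, c ∈ d.keys ↔ c ∈ w)

-- window algebra
lemma pvW_empty (cs : List Char) (l r : Nat) (h : r ≤ l) : pvW cs l r = [] := by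
  simp [pvW, Nat.sub_eq_zero_of_le h]
lemma pvW_append (cs : List Char) (l r : Nat) (hl : l ≤ r) (hr : r < cs.length) :
    pvW cs l (r + 1) = pvW cs l r ++ [cs.getD r ' '] := by
  unfold pvW
  have h1 : r + 1 - l = (r - l) + 1 := by omega
  have h2 : (cs.drop l)[r - l]? = some cs[r] := by
    rw [List.getElem?_drop]
    have : l + (r - l) = r := by omega
    rw [this, List.getElem?_eq_getElem hr]
  have h3 : cs.getD r ' ' = cs[r] := by
    rw [List.getD_eq_getElem?_getD, List.getElem?_eq_getElem hr]; rfl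
  rw [h1, List.take_add_one, h2, h3]
  rfl
lemma pvW_cons (cs : List Char) (l r : Nat) (hl : l < r) (hn : l < cs.length) :
    pvW cs l r = cs.getD l ' ' :: pvW cs (l + 1) r := by
  unfold pvW
  rw [List.drop_eq_getElem_cons hn]
  have h1 : r - l = (r - (l + 1)) + 1 := by omega
  have h3 : cs.getD l ' ' = cs[l] := by
    rw [List.getD_eq_getElem?_getD, List.getElem?_eq_getElem hn]; rfl
  rw [h1, h3, List.take_succ_cons]
lemma pvW_drop (cs : List Char) (l l' r : Nat) (h : l ≤ l') :
    pvW cs l' r = (pvW cs l r).drop (l' - l) := by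
  unfold pvW
  rw [List.drop_take, List.drop_drop]
  have h1 : l + (l' - l) = l' := by omega
  have h2 : r - l - (l' - l) = r - l' := by omega
  rw [h1, h2]
lemma pvRun_pos (cs : List Char) (r : Nat) : 1 ≤ pvRun cs r := by
  cases r with
  | zero => simp [pvRun]
  | succ p => simp only [pvRun]; split <;> omega
lemma pvBad_mono (cs : List Char) (k m target t : Int) (l l' p : Nat)
    (h1 : l ≤ l') (h2 : pvBad cs k m target t l' p = true) : pvBad cs k m target t l p = true := by
  unfold pvBad at h2 ⊢
  simp only [decide_eq_true_eq] at h2 ⊢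
  have hdrop : pvW cs l' (p + 1) = (pvW cs l (p + 1)).drop (l' - l) := pvW_drop cs l l' (p + 1) h1
  have hsub : (pvW cs l' (p + 1)).Sublist (pvW cs l (p + 1)) := by
    rw [hdrop]; exact List.drop_sublist _ _
  rcases h2 with h2 | h2 | h2 | h2
  · left
    refine lt_of_lt_of_le h2 ?_
    have := List.take_append_drop (l' - l) (pvW cs l (p + 1))
    have hsplit : pvTot cs l (p + 1)
        = (((pvW cs l (p + 1)).take (l' - l)).map (fun c => (c.toNat : Int))).sum
          + pvTot cs l' (p + 1) := by
      unfold pvTot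
      rw [hdrop, ← List.sum_append, ← List.map_append, List.take_append_drop]
    have hnn : 0 ≤ (((pvW cs l (p + 1)).take (l' - l)).map (fun c => (c.toNat : Int))).sum := by
      apply List.sum_nonneg
      intro x hx
      simp only [List.mem_map] at hx
      rcases hx with ⟨c, -, rfl⟩
      exact Int.natCast_nonneg _
    omega
  · right; left
    refine lt_of_lt_of_le h2 ?_
    have : (pvW cs l' (p + 1)).toFinset ⊆ (pvW cs l (p + 1)).toFinset := by
      intro x hx
      simp only [List.mem_toFinset] at hx ⊢
      exact hsub.subset hx
    exact_mod_cast Finset.card_le_card this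
  · right; right; left
    refine lt_of_lt_of_le h2 ?_
    exact_mod_cast hsub.count_le _
  · right; right; right
    refine lt_of_lt_of_le h2 ?_
    have : min (pvRun cs p) (p + 1 - l') ≤ min (pvRun cs p) (p + 1 - l) := by
      apply min_le_min_left
      omega
    exact_mod_cast this
lemma pvValid_mono (cs : List Char) (k m target t : Int) (l l' r : Nat)
    (h1 : l ≤ l') (h : pvValid cs k m target t l r) : pvValid cs k m target t l' r := by
  intro p hp hl
  have hlp := h p hp (h1.trans hl)
  cases hb : pvBad cs k m target t l' p with
  | false => rfl
  | true => rw [pvBad_mono cs k m target t l l' p h1 hb] at hlp; cases hlp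
lemma pvLx_le (cs : List Char) (k m target t : Int) (r : Nat) : pvLx cs k m target t r ≤ r := by
  unfold pvLx
  exact @Nat.find_le _ _ (pvValidDec cs k m target t r) _ (fun p hp hl => absurd hl (by omega))
lemma pvLx_valid (cs : List Char) (k m target t : Int) (r : Nat) :
    pvValid cs k m target t (pvLx cs k m target t r) r := by
  unfold pvLx
  exact @Nat.find_spec _ (pvValidDec cs k m target t r) _
lemma pvLx_min (cs : List Char) (k m target t : Int) (r q : Nat)
    (h : q < pvLx cs k m target t r) : ¬ pvValid cs k m target t q r := by
  unfold pvLx at h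
  exact @Nat.find_min _ (pvValidDec cs k m target t r) _ _ h

-- dict lemmas (erase has no library lemmas; these are proved from the definitions)
lemma pvFindFilter (c c' : Char) (items : List (Char × Int)) :
    (items.filter (fun p => !(p.1 == c))).find? (fun p => p.1 == c')
      = if c' = c then none else items.find? (fun p => p.1 == c') := by
  induction items with
  | nil => simp
  | cons p rest ih =>
    by_cases hpc : p.1 = c
    · have hcf : (p :: rest).filter (fun p => !(p.1 == c)) = rest.filter (fun p => !(p.1 == c)) := by
        simp [hpc]
      rw [hcf, ih]
      split
      · rfl
      · next hne =>
        have hb : (p.1 == c') = false := by simp [hpc]; exact fun h => hne h.symm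
        simp [hb]
    · have hcf : (p :: rest).filter (fun p => !(p.1 == c)) = p :: rest.filter (fun p => !(p.1 == c)) := by
        simp [hpc]
      rw [hcf]
      by_cases hpc' : p.1 = c'
      · have h1 : (p.1 == c') = true := by simp [hpc']
        have h2 : c' ≠ c := fun h => hpc (hpc' ▸ h)
        simp [h1, h2]
      · have h1 : (p.1 == c') = false := by simp [hpc']
        simp only [List.find?_cons, h1]
        exact ih

lemma pvGet?_erase (d : PySem.Dict Char Int) (c c' : Char) :
    (d.erase c).get? c' = if c' = c then none else d.get? c' := by
  rcases d with ⟨items⟩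
  simp only [PySem.Dict.erase, PySem.Dict.get?, pvFindFilter]
  split <;> rfl
lemma pvMem_keys_erase (d : PySem.Dict Char Int) (c c' : Char) :
    c' ∈ (d.erase c).keys ↔ c' ≠ c ∧ c' ∈ d.keys := by
  rcases d with ⟨items⟩
  simp only [PySem.Dict.erase, PySem.Dict.keys, List.mem_map, List.mem_filter]
  constructor
  · rintro ⟨p, ⟨hp, hne⟩, rfl⟩
    simp only [Bool.not_eq_eq_eq_not, Bool.not_true, beq_eq_false_iff_ne, ne_eq] at hne
    exact ⟨hne, ⟨p, hp, rfl⟩⟩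
  · rintro ⟨hne, ⟨p, hp, rfl⟩⟩
    exact ⟨p, ⟨hp, by simpa using hne⟩, rfl⟩
lemma pvNodup_keys_erase (d : PySem.Dict Char Int) (c : Char) (h : d.keys.Nodup) :
    (d.erase c).keys.Nodup := by
  rcases d with ⟨items⟩
  simp only [PySem.Dict.erase, PySem.Dict.keys] at *
  exact List.Nodup.sublist (List.Sublist.map _ List.filter_sublist) h
lemma pvDictOK_empty : pvDictOK PySem.Dict.empty [] := by
  refine ⟨?_, ?_, ?_⟩
  · simp [PySem.Dict.empty, PySem.Dict.keys]
  · intro c; simp [pysem]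
  · intro c; simp [PySem.Dict.empty, PySem.Dict.keys]
lemma pvDictOK_insert (d : PySem.Dict Char Int) (w : List Char) (c : Char) (h : pvDictOK d w) :
    pvDictOK (d.insert c (d.getD c 0 + 1)) (w ++ [c]) := by
  rcases h with ⟨h1, h2, h3⟩
  refine ⟨PySem.Dict.nodup_keys_insert d c _ h1, ?_, ?_⟩
  · intro c'
    rw [PySem.Dict.getD_insert]
    by_cases hc : c' = c
    · subst hc
      rw [if_pos rfl, h2 c']
      simp [List.count_append]
    · rw [if_neg hc, h2 c']
      have : w.count c' = (w ++ [c]).count c' := by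
        simp [List.count_append, List.count_singleton]
        intro h; exact absurd h.symm hc
      rw [this]
  · intro c'
    rw [PySem.Dict.mem_keys_insert]
    rw [h3 c']
    simp only [List.mem_append, List.mem_singleton]
    tauto
lemma pvDictOK_size (d : PySem.Dict Char Int) (w : List Char) (h : pvDictOK d w) :
    d.size = w.toFinset.card := by
  rcases h with ⟨h1, h2, h3⟩
  have hk : d.keys.toFinset = w.toFinset := by
    ext c
    simp only [List.mem_toFinset]
    exact h3 c
  have hl : d.size = d.keys.length := by
    rcases d with ⟨items⟩
    simp [PySem.Dict.size, PySem.Dict.keys]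
  rw [hl, ← List.toFinset_card_of_nodup h1, hk]

lemma pvGetD_erase (d : PySem.Dict Char Int) (c c' : Char) :
    (d.erase c).getD c' 0 = if c' = c then 0 else d.getD c' 0 := by
  rw [PySem.Dict.getD_eq_get?_getD, pvGet?_erase]
  split
  · rfl
  · rw [PySem.Dict.getD_eq_get?_getD]

-- the pop body moves the window's left end one step right
lemma pvSlidePop_spec (cs : List Char) (l r : Nat) (hl : l < r) (hr : r ≤ cs.length)
    (d : PySem.Dict Char Int) (hd : pvDictOK d (pvW cs l r)) :
    ∃ d', slidePop cs (d, pvTot cs l r, (l : Int)) = (d', pvTot cs (l + 1) r, ((l + 1 : Nat) : Int))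
      ∧ pvDictOK d' (pvW cs (l + 1) r) := by
  rcases hd with ⟨h1, h2, h3⟩
  have hn : l < cs.length := lt_of_lt_of_le hl hr
  have hW := pvW_cons cs l r hl hn
  set c0 := cs.getD l ' ' with hc0
  have hget : (PySem.List.pyGet? cs ((l : Nat) : Int)).getD ' ' = c0 := by
    rw [PySem.List.pyGet?_natCast, List.getElem?_eq_getElem hn]
    rw [hc0, List.getD_eq_getElem?_getD, List.getElem?_eq_getElem hn]
  have htot : pvTot cs l r = (c0.toNat : Int) + pvTot cs (l + 1) r := by
    unfold pvTot
    rw [hW]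
    simp
  set d1 := d.modify c0 0 (· - 1) with hd1
  have hgd1 : ∀ c', d1.getD c' 0 = ((pvW cs (l + 1) r).count c' : Int) := by
    intro c'
    rw [hd1, PySem.Dict.getD_modify, h2 c0, h2 c', hW]
    by_cases hc : c' = c0
    · subst hc
      rw [if_pos rfl, List.count_cons_self]
      push_cast
      ring
    · rw [if_neg hc, List.count_cons_of_ne (fun h => hc h.symm)]
  have hmem1 : ∀ c', c' ∈ d1.keys ↔ c' = c0 ∨ c' ∈ pvW cs l r := by
    intro c'
    rw [hd1, PySem.Dict.keys_modify]
    rw [PySem.Dict.mem_keys_insert]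
    rw [h3 c']
  have hnd1 : d1.keys.Nodup := by
    rw [hd1, PySem.Dict.keys_modify]
    exact PySem.Dict.nodup_keys_insert d c0 _ h1
  refine ⟨if (d1.getD c0 0 == 0) = true then d1.erase c0 else d1, ?_, ?_⟩
  · show slidePop cs (d, pvTot cs l r, (l : Int)) = _
    unfold slidePop
    simp only [hget]
    refine Prod.ext ?_ (Prod.ext ?_ ?_)
    · simp only [← hd1]
    · simp only
      omega
    · simp only
      push_cast
      ring
  · by_cases hz : d1.getD c0 0 = 0
    · have hc0nm : c0 ∉ pvW cs (l + 1) r := by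
        rw [← List.count_eq_zero]
        have := hgd1 c0
        omega
      have hif : (if (d1.getD c0 0 == 0) = true then d1.erase c0 else d1) = d1.erase c0 := by
        simp [hz]
      rw [hif]
      refine ⟨pvNodup_keys_erase d1 c0 hnd1, ?_, ?_⟩
      · intro c'
        rw [pvGetD_erase]
        by_cases hc : c' = c0
        · subst hc
          rw [if_pos rfl]
          rw [List.count_eq_zero.mpr hc0nm]
          rfl
        · rw [if_neg hc, hgd1 c']
      · intro c'
        rw [pvMem_keys_erase, hmem1 c', hW]
        simp only [List.mem_cons]
        constructor
        · rintro ⟨hne, h | h⟩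
          · exact absurd h hne
          · rcases h with h | h
            · exact absurd h hne
            · exact h
        · intro h
          have hne : c' ≠ c0 := fun he => hc0nm (he ▸ h)
          exact ⟨hne, Or.inr (Or.inr h)⟩
    · have hc0m : c0 ∈ pvW cs (l + 1) r := by
        have := hgd1 c0
        rcases List.count_pos_iff.mp (show 0 < (pvW cs (l + 1) r).count c0 by
          by_contra hcc
          have hzz : (pvW cs (l + 1) r).count c0 = 0 := by omega
          rw [hzz] at this
          exact hz (by simpa using this)) with hm
        exact hm
      have hif : (if (d1.getD c0 0 == 0) = true then d1.erase c0 else d1) = d1 := by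
        simp [hz]
      rw [hif]
      refine ⟨hnd1, hgd1, ?_⟩
      intro c'
      rw [hmem1 c', hW]
      simp only [List.mem_cons]
      constructor
      · rintro (h | h | h)
        · exact h ▸ hc0m
        · exact h ▸ hc0m
        · exact h
      · intro h
        exact Or.inr (Or.inr h)

lemma pvRunPop_spec (cs : List Char) (r : Nat) (nl : Int) :
    ∀ (j l : Nat) (d : PySem.Dict Char Int), ((l : Int) + j = max nl (l : Int)) → l + j ≤ r → r ≤ cs.length →
    pvDictOK d (pvW cs l r) →
    ∃ d', slideRunPop cs nl j (d, pvTot cs l r, (l : Int))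
        = (d', pvTot cs (l + j) r, ((l + j : Nat) : Int))
      ∧ pvDictOK d' (pvW cs (l + j) r) := by
  intro j
  induction j with
  | zero =>
    intro l d _ _ _ hd
    exact ⟨d, by simp [slideRunPop], by simpa using hd⟩
  | succ j ih =>
    intro l d hmax hbound hr hd
    have hnl : nl = (l : Int) + (j + 1) := by
      rcases max_choice nl (l : Int) with h | h <;> omega
    have hlr : l < r := by omega
    have hcond : ((l : Int) < nl) := by omega
    rcases pvSlidePop_spec cs l r hlr hr d hd with ⟨d2, hpop, hd2⟩
    have hstep : slideRunPop cs nl (j + 1) (d, pvTot cs l r, (l : Int))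
        = slideRunPop cs nl j (d2, pvTot cs (l + 1) r, ((l + 1 : Nat) : Int)) := by
      simp only [slideRunPop]
      rw [if_pos hcond, hpop]
    rw [hstep]
    rcases ih (l + 1) d2 (by push_cast; omega) (by omega) hr hd2 with ⟨d', hrun, hd'⟩
    refine ⟨d', ?_, ?_⟩
    · rw [hrun]
      have hjj : l + 1 + j = l + (j + 1) := by omega
      rw [hjj]
    · have : l + 1 + j = l + (j + 1) := by omega
      rw [← this]
      exact hd'

lemma pvShrink_spec (cs : List Char) (k m target t : Int)
    (hk : 0 ≤ k) (hm : 0 ≤ m) (ht : 0 ≤ target) (r : Nat) (hr : r < cs.length) :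
    ∀ (fuel l : Nat) (d : PySem.Dict Char Int), l ≤ r + 1 → r + 2 - l ≤ fuel →
    pvDictOK d (pvW cs l (r + 1)) →
    (∀ p, l ≤ p → p < r → pvBad cs k m target t l p = false) →
    (((min (pvRun cs r) (r + 1 - l) : Nat) : Int) ≤ t) →
    ∃ d' l', slideShrink cs k m target (cs.getD r ' ') fuel (d, pvTot cs l (r + 1), (l : Int))
        = (d', pvTot cs l' (r + 1), ((l' : Nat) : Int))
      ∧ pvDictOK d' (pvW cs l' (r + 1)) ∧ l ≤ l' ∧ l' ≤ r + 1
      ∧ (∀ q, l ≤ q → q < l' → ¬ pvValid cs k m target t q (r + 1))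
      ∧ pvValid cs k m target t l' (r + 1) := by
  intro fuel
  induction fuel with
  | zero =>
    intro l d hl hf
    omega
  | succ fuel ih =>
    intro l d hl hf hd hInv hrun
    have hsize : (d.size : Int) = ((pvW cs l (r + 1)).toFinset.card : Int) := by
      rw [pvDictOK_size d _ hd]
    have hcnt : d.getD (cs.getD r ' ') 0 = ((pvW cs l (r + 1)).count (cs.getD r ' ') : Int) :=
      hd.2.1 _
    by_cases hcond : target < pvTot cs l (r + 1) ∨ k < (d.size : Int) ∨ m < d.getD (cs.getD r ' ') 0
    · -- the while condition fires: l ≤ r, pop once and recurse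
      have hlr : l ≤ r := by
        by_contra hgt
        have hleq : l = r + 1 := by omega
        subst hleq
        have hWe : pvW cs (r + 1) (r + 1) = [] := pvW_empty cs _ _ le_rfl
        have h0 : pvTot cs (r + 1) (r + 1) = 0 := by simp [pvTot, hWe]
        have h1c : ((pvW cs (r + 1) (r + 1)).toFinset.card : Int) = 0 := by rw [hWe]; simp
        have h2c : ((pvW cs (r + 1) (r + 1)).count (cs.getD r ' ') : Int) = 0 := by rw [hWe]; simp
        rcases hcond with h | h | h <;> omega
      have hbad : pvBad cs k m target t l r = true := by
        unfold pvBad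
        rw [decide_eq_true_eq]
        rcases hcond with h | h | h
        · exact Or.inl h
        · exact Or.inr (Or.inl (by omega))
        · exact Or.inr (Or.inr (Or.inl (by omega)))
      rcases pvSlidePop_spec cs l (r + 1) (by omega) (by omega) d hd with ⟨d2, hpop, hd2⟩
      have hstep : slideShrink cs k m target (cs.getD r ' ') (fuel + 1) (d, pvTot cs l (r + 1), (l : Int))
          = slideShrink cs k m target (cs.getD r ' ') fuel (d2, pvTot cs (l + 1) (r + 1), ((l + 1 : Nat) : Int)) := by
        simp only [slideShrink]
        rw [if_pos hcond, hpop]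
      have hInv2 : ∀ p, l + 1 ≤ p → p < r → pvBad cs k m target t (l + 1) p = false := by
        intro p hp1 hp2
        cases hb : pvBad cs k m target t (l + 1) p with
        | false => rfl
        | true =>
          have := pvBad_mono cs k m target t l (l + 1) p (by omega) hb
          rw [hInv p (by omega) hp2] at this
          cases this
      have hrun2 : ((min (pvRun cs r) (r + 1 - (l + 1)) : Nat) : Int) ≤ t := by
        have hmm : min (pvRun cs r) (r + 1 - (l + 1)) ≤ min (pvRun cs r) (r + 1 - l) :=
          min_le_min_left _ (by omega)
        calc ((min (pvRun cs r) (r + 1 - (l + 1)) : Nat) : Int)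
            ≤ ((min (pvRun cs r) (r + 1 - l) : Nat) : Int) := by exact_mod_cast hmm
          _ ≤ t := hrun
      rcases ih (l + 1) d2 (by omega) (by omega) hd2 hInv2 hrun2 with
        ⟨d', l', heq, hd', hll, hlr', hinval, hval⟩
      refine ⟨d', l', by rw [hstep]; exact heq, hd', by omega, hlr', ?_, hval⟩
      intro q hq1 hq2
      rcases Nat.eq_or_lt_of_le hq1 with rfl | hq
      · intro hvq
        have := hvq r (by omega) hlr
        rw [hbad] at this
        cases this
      · exact hinval q (by omega) hq2
    · -- the while condition is false: stop here, this l is the least valid left end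
      refine ⟨d, l, ?_, hd, le_rfl, hl, by omega, ?_⟩
      · simp only [slideShrink]
        rw [if_neg hcond]
      · intro p hp hlp
        rcases Nat.lt_succ_iff_lt_or_eq.mp hp with hp' | rfl
        · exact hInv p hlp hp'
        · push_neg at hcond
          unfold pvBad
          rw [decide_eq_false_iff_not]
          push_neg
          refine ⟨by omega, by omega, by omega, hrun⟩

-- A's loop invariant: after processing right = 0..r-1 the state is determined by pvLx
def pvRep (cs : List Char) : Nat → Int
  | 0 => 1
  | r + 1 => (pvRun cs r : Int)
def pvInvA (cs : List Char) (k m target t : Int) (r : Nat)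
    (st : PySem.Dict Char Int × Int × Int × Int × Int) : Prop :=
  ∃ d, st = (d, pvTot cs (pvLx cs k m target t r) r, ((pvLx cs k m target t r : Nat) : Int),
             pvRep cs r, pvMlA cs k m target t r)
    ∧ pvDictOK d (pvW cs (pvLx cs k m target t r) r)

lemma pvStepA (cs : List Char) (k m target t : Int)
    (hk : 0 ≤ k) (hm : 0 ≤ m) (ht : 0 ≤ target) (htt : 0 ≤ t) (r : Nat) (hr : r < cs.length)
    (st : PySem.Dict Char Int × Int × Int × Int × Int) (h : pvInvA cs k m target t r st) :
    pvInvA cs k m target t (r + 1)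
      (let (count, ascii, left, rep, max_len) := st
       let c := cs.getD r ' '
       let count := count.insert c (count.getD c 0 + 1)
       let ascii := ascii + (c.toNat : Int)
       let rep := if 0 < r ∧ cs.getD (r - 1) ' ' = c then rep + 1 else 1
       let (count, ascii, left) :=
         if t < rep then
           let new_left : Int := (r : Int) - t + 1
           slideRunPop cs new_left (new_left - left).toNat (count, ascii, left)
         else (count, ascii, left)
       let (count, ascii, left) := slideShrink cs k m target c (cs.length + 1) (count, ascii, left)
       (count, ascii, left, rep, max max_len ((r : Int) - left + 1))) := by
  rcases h with ⟨d, hst, hOK⟩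
  subst hst
  have hn : r < cs.length := hr
  set n := cs.length with hnn
  set L0 := pvLx cs k m target t r with hL0
  have hL0r : L0 ≤ r := pvLx_le cs k m target t r
  set c := cs.getD r ' ' with hc
  have hWapp : pvW cs L0 (r + 1) = pvW cs L0 r ++ [c] := pvW_append cs L0 r hL0r hn
  have hTot1 : pvTot cs L0 r + (c.toNat : Int) = pvTot cs L0 (r + 1) := by
    unfold pvTot
    rw [hWapp]
    simp
  have hOK1 : pvDictOK (d.insert c (d.getD c 0 + 1)) (pvW cs L0 (r + 1)) := by
    rw [hWapp]
    exact pvDictOK_insert d _ c hOK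
  have hrep : (if 0 < r ∧ cs.getD (r - 1) ' ' = c then pvRep cs r + 1 else 1) = (pvRun cs r : Int) := by
    cases r with
    | zero => simp [pvRun]
    | succ p =>
      have hcond : (0 < p + 1 ∧ cs.getD (p + 1 - 1) ' ' = c) ↔ cs.getD p ' ' = cs.getD (p + 1) ' ' := by
        constructor
        · rintro ⟨-, hh⟩; simpa [hc] using hh
        · intro hh; exact ⟨by omega, by simpa [hc] using hh⟩
      simp only [pvRep, pvRun]
      by_cases hcc : cs.getD p ' ' = cs.getD (p + 1) ' '
      · rw [if_pos (hcond.mpr hcc), if_pos hcc]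
        push_cast
        ring
      · rw [if_neg (fun hx => hcc (hcond.mp hx)), if_neg hcc]
        norm_num
  by_cases hreprun : t < (pvRun cs r : Int)
  case pos =>
    set nl : Int := (r : Int) - t + 1 with hnl
    set j : Nat := (nl - (L0 : Int)).toNat with hj
    set l2 : Nat := L0 + j with hl2
    have hmax : (L0 : Int) + j = max nl (L0 : Int) := by
      rw [hj]
      omega
    have hl2b : l2 ≤ r + 1 := by
      have h1 : nl ≤ (r : Int) + 1 := by omega
      have : (l2 : Int) ≤ (r : Int) + 1 := by
        push_cast [hl2]
        rcases max_choice nl (L0 : Int) with hmc | hmc <;> omega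
      exact_mod_cast this
    rcases pvRunPop_spec cs (r + 1) nl j L0 (d.insert c (d.getD c 0 + 1))
        hmax (by omega) (by omega) hOK1 with ⟨d2, hpop2, hOK2⟩
    have hrun2 : ((min (pvRun cs r) (r + 1 - l2) : Nat) : Int) ≤ t := by
      have hge : nl ≤ (l2 : Int) := by
        push_cast [hl2]
        omega
      have h1 : ((r + 1 - l2 : Nat) : Int) ≤ t := by omega
      calc ((min (pvRun cs r) (r + 1 - l2) : Nat) : Int)
          ≤ ((r + 1 - l2 : Nat) : Int) := by exact_mod_cast min_le_right _ _
        _ ≤ t := h1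
    have hInv2 : ∀ p, l2 ≤ p → p < r → pvBad cs k m target t l2 p = false := by
      intro p hp1 hp2
      exact pvValid_mono cs k m target t L0 l2 r (by omega) (pvLx_valid cs k m target t r) p hp2 hp1
    rcases pvShrink_spec cs k m target t hk hm ht r hn (n + 1) l2 d2 hl2b (by omega) hOK2 hInv2 hrun2 with
      ⟨d3, l3, hshr, hOK3, hl2l3, hl3b, hinval, hval⟩
    have hl3L : l3 = pvLx cs k m target t (r + 1) := by
      have hnotlt : ¬ (l3 < pvLx cs k m target t (r + 1)) := fun hlt =>
        pvLx_min cs k m target t (r + 1) l3 hlt hval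
      have hvalL1 := pvLx_valid cs k m target t (r + 1)
      have hnotgt : ¬ (pvLx cs k m target t (r + 1) < l3) := by
        intro hgt
        set L1 := pvLx cs k m target t (r + 1) with hL1
        by_cases hge2 : l2 ≤ L1
        · exact hinval L1 hge2 hgt (pvLx_valid cs k m target t (r + 1))
        · push_neg at hge2
          by_cases hgeL0 : L0 ≤ L1
          · have hL1r : L1 ≤ r := by omega
            have hbadrun : pvBad cs k m target t L1 r = true := by
              unfold pvBad
              rw [decide_eq_true_eq]
              refine Or.inr (Or.inr (Or.inr ?_))
              have hlt2 : (L1 : Int) < nl := by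
                have hx : (L1 : Int) < (l2 : Int) := by exact_mod_cast hge2
                rw [hl2] at hx
                push_cast at hx
                omega
              have hlen : t < ((r + 1 - L1 : Nat) : Int) := by omega
              have h1 : t < ((min (pvRun cs r) (r + 1 - L1) : Nat) : Int) := by
                push_cast [Nat.cast_min]
                push_cast at hreprun hlen
                omega
              exact h1
            have hfx := hvalL1 r (by omega) hL1r
            rw [hbadrun] at hfx
            cases hfx
          · push_neg at hgeL0
            have hvr : pvValid cs k m target t L1 r := by
              intro p hp hl
              exact hvalL1 p (by omega) hl
            exact pvLx_min cs k m target t r L1 hgeL0 hvr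
      omega
    refine ⟨d3, ?_, by rw [hl3L] at hOK3; exact hOK3⟩
    simp only
    rw [hrep, if_pos hreprun, hTot1, hpop2, hshr]
    have hml : max (pvMlA cs k m target t r) ((r : Int) - ((l3 : Nat) : Int) + 1)
        = pvMlA cs k m target t (r + 1) := by
      rw [hl3L]
      unfold pvMlA
      rw [List.range_succ, List.foldl_append]
      simp only [List.foldl_cons, List.foldl_nil]
      congr 1
      ring
    rw [hml, hl3L]
    rfl
  case neg =>
    have hrun2 : ((min (pvRun cs r) (r + 1 - L0) : Nat) : Int) ≤ t := by
      push_neg at hreprun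
      calc ((min (pvRun cs r) (r + 1 - L0) : Nat) : Int)
          ≤ ((pvRun cs r : Nat) : Int) := by exact_mod_cast min_le_left _ _
        _ ≤ t := hreprun
    have hInv2 : ∀ p, L0 ≤ p → p < r → pvBad cs k m target t L0 p = false := by
      intro p hp1 hp2
      exact pvLx_valid cs k m target t r p hp2 hp1
    rcases pvShrink_spec cs k m target t hk hm ht r hn (n + 1) L0 (d.insert c (d.getD c 0 + 1))
        (by omega) (by omega) hOK1 hInv2 hrun2 with
      ⟨d3, l3, hshr, hOK3, hl2l3, hl3b, hinval, hval⟩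
    have hl3L : l3 = pvLx cs k m target t (r + 1) := by
      have hnotlt : ¬ (l3 < pvLx cs k m target t (r + 1)) := fun hlt =>
        pvLx_min cs k m target t (r + 1) l3 hlt hval
      have hvalL1 := pvLx_valid cs k m target t (r + 1)
      have hnotgt : ¬ (pvLx cs k m target t (r + 1) < l3) := by
        intro hgt
        set L1 := pvLx cs k m target t (r + 1) with hL1
        by_cases hge2 : L0 ≤ L1
        · exact hinval L1 hge2 hgt (pvLx_valid cs k m target t (r + 1))
        · push_neg at hge2
          have hvr : pvValid cs k m target t L1 r := by
            intro p hp hl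
            exact hvalL1 p (by omega) hl
          exact pvLx_min cs k m target t r L1 hge2 hvr
      omega
    refine ⟨d3, ?_, by rw [hl3L] at hOK3; exact hOK3⟩
    simp only
    rw [hrep, if_neg hreprun, hTot1, hshr]
    have hml : max (pvMlA cs k m target t r) ((r : Int) - ((l3 : Nat) : Int) + 1)
        = pvMlA cs k m target t (r + 1) := by
      rw [hl3L]
      unfold pvMlA
      rw [List.range_succ, List.foldl_append]
      simp only [List.foldl_cons, List.foldl_nil]
      congr 1
      ring
    rw [hml, hl3L]
    rfl

lemma pvA_eq (s : String) (k m target t : Int)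
    (hk : 0 ≤ k) (hm : 0 ≤ m) (ht : 0 ≤ target) (htt : 0 ≤ t) :
    sliding_multi s k m target t = pvMlA s.toList k m target t s.toList.length := by
  have main : ∀ r : Nat, r ≤ s.toList.length →
      pvInvA s.toList k m target t r
        ((List.range r).foldl (fun st right =>
          let (count, ascii, left, rep, max_len) := st
          let c := s.toList.getD right ' '
          let count := count.insert c (count.getD c 0 + 1)
          let ascii := ascii + (c.toNat : Int)
          let rep := if 0 < right ∧ s.toList.getD (right - 1) ' ' = c then rep + 1 else 1
          let (count, ascii, left) :=
            if t < rep then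
              let new_left : Int := (right : Int) - t + 1
              slideRunPop s.toList new_left (new_left - left).toNat (count, ascii, left)
            else (count, ascii, left)
          let (count, ascii, left) := slideShrink s.toList k m target c (s.toList.length + 1) (count, ascii, left)
          (count, ascii, left, rep, max max_len ((right : Int) - left + 1)))
          (PySem.Dict.empty, 0, 0, 1, 0)) := by
    intro r
    induction r with
    | zero =>
      intro _
      have h0 : pvLx s.toList k m target t 0 = 0 := Nat.le_zero.mp (pvLx_le s.toList k m target t 0)
      have hW0 : pvW s.toList 0 0 = [] := pvW_empty s.toList 0 0 le_rfl
      refine ⟨PySem.Dict.empty, ?_, ?_⟩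
      · rw [List.range_zero, List.foldl_nil]
        rw [h0]
        have ht0 : pvTot s.toList 0 0 = 0 := by simp [pvTot, hW0]
        rw [ht0]
        rfl
      · rw [h0, hW0]
        exact pvDictOK_empty
    | succ r ih =>
      intro hr1
      rw [List.range_succ, List.foldl_append, List.foldl_cons, List.foldl_nil]
      exact pvStepA s.toList k m target t hk hm ht htt r (by omega) _ (ih (by omega))
  rcases main s.toList.length le_rfl with ⟨d, heq, -⟩
  show ((List.range s.toList.length).foldl (fun st right =>
          let (count, ascii, left, rep, max_len) := st
          let c := s.toList.getD right ' '
          let count := count.insert c (count.getD c 0 + 1)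
          let ascii := ascii + (c.toNat : Int)
          let rep := if 0 < right ∧ s.toList.getD (right - 1) ' ' = c then rep + 1 else 1
          let (count, ascii, left) :=
            if t < rep then
              let new_left : Int := (right : Int) - t + 1
              slideRunPop s.toList new_left (new_left - left).toNat (count, ascii, left)
            else (count, ascii, left)
          let (count, ascii, left) := slideShrink s.toList k m target c (s.toList.length + 1) (count, ascii, left)
          (count, ascii, left, rep, max max_len ((right : Int) - left + 1)))
          (PySem.Dict.empty, 0, 0, 1, 0)).2.2.2.2 = pvMlA s.toList k m target t s.toList.length
  rw [heq]

-- B's inner loop computes pvReach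
lemma pvTry_eq (cs : List Char) (k m target t : Int) (l : Nat) :
    ∀ (r : Nat) (d : PySem.Dict Char Int) (total run best : Int), l ≤ r → r ≤ cs.length →
    pvDictOK d (pvW cs l r) → total = pvTot cs l r →
    (l < r → run = ((min (pvRun cs (r - 1)) (r - l) : Nat) : Int)) → 0 ≤ best →
    slideTry cs k m target t l (List.range' r (cs.length - r)) d total run best
      = max best (pvReach cs k m target t l r) := by
  suffices H : ∀ (q r : Nat) (d : PySem.Dict Char Int) (total run best : Int), cs.length - r ≤ q → l ≤ r → r ≤ cs.length →
      pvDictOK d (pvW cs l r) → total = pvTot cs l r →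
      (l < r → run = ((min (pvRun cs (r - 1)) (r - l) : Nat) : Int)) → 0 ≤ best →
      slideTry cs k m target t l (List.range' r (cs.length - r)) d total run best
        = max best (pvReach cs k m target t l r) by
    intro r d total run best h1 h2 h3 h4 h5 h6
    exact H cs.length r d total run best (by omega) h1 h2 h3 h4 h5 h6
  intro q
  induction q with
  | zero =>
    intro r d total run best hq hlr hrn hd htot hrun hbest
    have hrn' : r = cs.length := by omega
    subst hrn'
    rw [Nat.sub_self, List.range'_zero]
    rw [pvReach, dif_neg (by omega)]
    simp only [slideTry]
    omega
  | succ q ih =>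
    intro r d total run best hq hlr hrn hd htot hrun hbest
    by_cases hrness : r < cs.length
    · have hq1 : cs.length - r = (cs.length - (r + 1)) + 1 := by omega
      rw [hq1, List.range'_succ]
      simp only [slideTry]
      set c := cs.getD r ' ' with hc
      have hWapp : pvW cs l (r + 1) = pvW cs l r ++ [c] := pvW_append cs l r hlr hrness
      have hOK1 : pvDictOK (d.insert c (d.getD c 0 + 1)) (pvW cs l (r + 1)) := by
        rw [hWapp]
        exact pvDictOK_insert d _ c hd
      have hTot1 : total + (c.toNat : Int) = pvTot cs l (r + 1) := by
        rw [htot]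
        unfold pvTot
        rw [hWapp]
        simp
      have hrun' : (if l < r ∧ cs.getD (r - 1) ' ' = c then run + 1 else 1)
          = ((min (pvRun cs r) (r + 1 - l) : Nat) : Int) := by
        by_cases hllr : l < r
        · cases r with
          | zero => omega
          | succ p =>
            rw [hrun hllr]
            simp only [Nat.add_sub_cancel]
            have hp1 : (1:Nat) ≤ pvRun cs p := pvRun_pos cs p
            by_cases hcc : cs.getD p ' ' = cs.getD (p + 1) ' '
            · rw [if_pos ⟨hllr, by simpa [hc] using hcc⟩]
              have hr1 : pvRun cs (p + 1) = pvRun cs p + 1 := by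
                simp only [pvRun]
                rw [if_pos hcc]
              rw [hr1]
              push_cast [Nat.cast_min]
              omega
            · rw [if_neg (by rintro ⟨-, hx⟩; exact hcc (by simpa [hc] using hx))]
              have hr1 : pvRun cs (p + 1) = 1 := by
                simp only [pvRun]
                rw [if_neg hcc]
              rw [hr1]
              push_cast [Nat.cast_min]
              omega
        · have hleq : l = r := by omega
          rw [if_neg (by rintro ⟨hx, -⟩; omega)]
          subst hleq
          have : min (pvRun cs l) (l + 1 - l) = 1 := by
            have := pvRun_pos cs l
            omega
          rw [this]
          rfl
      have hsize : ((d.insert c (d.getD c 0 + 1)).size : Int)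
          = ((pvW cs l (r + 1)).toFinset.card : Int) := by
        rw [pvDictOK_size _ _ hOK1]
      have hcnt : (d.insert c (d.getD c 0 + 1)).getD c 0
          = ((pvW cs l (r + 1)).count c : Int) := hOK1.2.1 c
      have hbadiff : (target < total + (c.toNat : Int)
            ∨ k < ((d.insert c (d.getD c 0 + 1)).size : Int)
            ∨ m < (d.insert c (d.getD c 0 + 1)).getD c 0
            ∨ t < (if l < r ∧ cs.getD (r - 1) ' ' = c then run + 1 else 1))
          ↔ pvBad cs k m target t l r = true := by
        unfold pvBad
        rw [decide_eq_true_eq, hTot1, hsize, hcnt, hrun']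
      by_cases hbad : pvBad cs k m target t l r = true
      · rw [if_pos (hbadiff.mpr hbad)]
        rw [pvReach, dif_pos hrness, if_pos hbad]
        omega
      · rw [if_neg (fun hx => hbad (hbadiff.mp hx))]
        have hbest' : (0:Int) ≤ max best ((r : Int) - (l : Int) + 1) := le_trans hbest (le_max_left _ _)
        have hrec := ih (r + 1) (d.insert c (d.getD c 0 + 1)) (total + (c.toNat : Int))
          (if l < r ∧ cs.getD (r - 1) ' ' = c then run + 1 else 1)
          (max best ((r : Int) - (l : Int) + 1))
          (by omega) (by omega) (by omega) hOK1 hTot1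
          (fun _ => by rw [hrun']; simp) hbest'
        have hreach : pvReach cs k m target t l r
            = max ((r : Int) + 1 - (l : Int)) (pvReach cs k m target t l (r + 1)) := by
          rw [pvReach, dif_pos hrness, if_neg (by simpa using hbad)]
        rw [hrec, hreach, max_assoc]
        congr 2
        ring
    · rw [Nat.sub_eq_zero_of_le (by omega), List.range'_zero]
      rw [pvReach, dif_neg (by omega)]
      simp only [slideTry]
      omega

lemma pvB_eq (s : String) (k m target t : Int) :
    sliding_multi_alt s k m target t
      = (List.range s.toList.length).foldl
          (fun a l => max a (pvReach s.toList k m target t l l)) 0 := by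
  have main : ∀ (L : List Nat) (best : Int), 0 ≤ best → (∀ l ∈ L, l ≤ s.toList.length) →
      L.foldl (fun best l => slideTry s.toList k m target t l (List.range' l (s.toList.length - l)) PySem.Dict.empty 0 0 best) best
        = L.foldl (fun a l => max a (pvReach s.toList k m target t l l)) best := by
    intro L
    induction L with
    | nil => intro best _ _; rfl
    | cons l L ih =>
      intro best hbest hL
      rw [List.foldl_cons, List.foldl_cons]
      have hW0 : pvW s.toList l l = [] := pvW_empty s.toList l l le_rfl
      have h1 : slideTry s.toList k m target t l (List.range' l (s.toList.length - l)) PySem.Dict.empty 0 0 best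
          = max best (pvReach s.toList k m target t l l) := by
        apply pvTry_eq s.toList k m target t l l PySem.Dict.empty 0 0 best le_rfl
          (hL l List.mem_cons_self) (by rw [hW0]; exact pvDictOK_empty)
          (by simp [pvTot, hW0]) (fun hx => absurd hx (lt_irrefl l)) hbest
      rw [h1]
      exact ih _ (le_trans hbest (le_max_left _ _)) (fun x hx => hL x (List.mem_cons_of_mem _ hx))
  show (List.range s.toList.length).foldl (fun best l => slideTry s.toList k m target t l (List.range' l (s.toList.length - l)) PySem.Dict.empty 0 0 best) 0
      = (List.range s.toList.length).foldl (fun a l => max a (pvReach s.toList k m target t l l)) 0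
  exact main (List.range s.toList.length) 0 le_rfl (fun l hl => le_of_lt (List.mem_range.mp hl))

-- foldl-max toolbox
lemma pvFoldMax_init (f : Nat → Int) (L : List Nat) (b : Int) :
    b ≤ L.foldl (fun a x => max a (f x)) b := by
  induction L generalizing b with
  | nil => exact le_rfl
  | cons a L ih =>
    rw [List.foldl_cons]
    exact le_trans (le_max_left _ _) (ih _)
lemma pvFoldMax_mem (f : Nat → Int) (L : List Nat) (b : Int) (x : Nat) (hx : x ∈ L) :
    f x ≤ L.foldl (fun a x => max a (f x)) b := by
  induction L generalizing b with
  | nil => cases hx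
  | cons a L ih =>
    rw [List.foldl_cons]
    rcases List.mem_cons.mp hx with rfl | hx'
    · exact le_trans (le_max_right _ _) (pvFoldMax_init f L _)
    · exact ih _ hx'
lemma pvFoldMax_le (f : Nat → Int) (L : List Nat) (b B : Int) (hb : b ≤ B)
    (h : ∀ x ∈ L, f x ≤ B) : L.foldl (fun a x => max a (f x)) b ≤ B := by
  induction L generalizing b with
  | nil => exact hb
  | cons a L ih =>
    rw [List.foldl_cons]
    exact ih _ (max_le hb (h a List.mem_cons_self)) (fun x hx => h x (List.mem_cons_of_mem _ hx))

lemma pvLx_le_of_valid (cs : List Char) (k m target t : Int) (l r : Nat)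
    (h : pvValid cs k m target t l r) : pvLx cs k m target t r ≤ l := by
  unfold pvLx
  exact @Nat.find_le _ _ (pvValidDec cs k m target t r) _ h

lemma pvReach_ge (cs : List Char) (k m target t : Int) :
    ∀ (l j r : Nat), l ≤ j → j ≤ r → r < cs.length →
    (∀ p, j ≤ p → p ≤ r → pvBad cs k m target t l p = false) →
    (r : Int) + 1 - l ≤ pvReach cs k m target t l j := by
  suffices H : ∀ (q l j r : Nat), r - j ≤ q → l ≤ j → j ≤ r → r < cs.length →
      (∀ p, j ≤ p → p ≤ r → pvBad cs k m target t l p = false) →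
      (r : Int) + 1 - l ≤ pvReach cs k m target t l j by
    intro l j r h1 h2 h3 h4
    exact H r l j r (by omega) h1 h2 h3 h4
  intro q
  induction q with
  | zero =>
    intro l j r hq h1 h2 h3 h4
    have hj : j = r := by omega
    subst hj
    rw [pvReach, dif_pos h3, if_neg (by rw [h4 j le_rfl le_rfl]; simp)]
    exact le_max_left _ _
  | succ q ih =>
    intro l j r hq h1 h2 h3 h4
    by_cases hjr : j = r
    · subst hjr
      rw [pvReach, dif_pos h3, if_neg (by rw [h4 j le_rfl le_rfl]; simp)]
      exact le_max_left _ _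
    · rw [pvReach, dif_pos (by omega), if_neg (by rw [h4 j le_rfl (by omega)]; simp)]
      refine le_trans ?_ (le_max_right _ _)
      exact ih l (j + 1) r (by omega) (by omega) (by omega) h3
        (fun p hp1 hp2 => h4 p (by omega) hp2)

lemma pvReach_le (cs : List Char) (k m target t : Int) :
    ∀ (l j : Nat), l ≤ j →
    (∀ p, l ≤ p → p < j → pvBad cs k m target t l p = false) →
    pvReach cs k m target t l j ≤ pvMlA cs k m target t cs.length := by
  suffices H : ∀ (q l j : Nat), cs.length - j ≤ q → l ≤ j →
      (∀ p, l ≤ p → p < j → pvBad cs k m target t l p = false) →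
      pvReach cs k m target t l j ≤ pvMlA cs k m target t cs.length by
    intro l j h1 h2
    exact H cs.length l j (by omega) h1 h2
  intro q
  induction q with
  | zero =>
    intro l j hq h1 h2
    rw [pvReach, dif_neg (by omega)]
    exact pvFoldMax_init _ _ _
  | succ q ih =>
    intro l j hq h1 h2
    by_cases hjn : j < cs.length
    · rw [pvReach, dif_pos hjn]
      by_cases hbad : pvBad cs k m target t l j = true
      · rw [if_pos hbad]
        exact pvFoldMax_init _ _ _
      · rw [if_neg hbad]
        apply max_le
        · have hvalid : pvValid cs k m target t l (j + 1) := by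
            intro p hp hl
            rcases Nat.lt_succ_iff_lt_or_eq.mp hp with hp' | rfl
            · exact h2 p hl hp'
            · simpa using hbad
          have hLle : pvLx cs k m target t (j + 1) ≤ l := pvLx_le_of_valid cs k m target t l (j + 1) hvalid
          calc (j : Int) + 1 - l ≤ (j : Int) + 1 - (pvLx cs k m target t (j + 1) : Int) := by
                have : ((pvLx cs k m target t (j + 1) : Nat) : Int) ≤ (l : Int) := by exact_mod_cast hLle
                omega
            _ ≤ pvMlA cs k m target t cs.length := by
                unfold pvMlA
                exact pvFoldMax_mem _ (List.range cs.length) 0 j (List.mem_range.mpr hjn)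
        · exact ih l (j + 1) (by omega) (by omega)
            (fun p hp1 hp2 => by
              rcases Nat.lt_succ_iff_lt_or_eq.mp hp2 with hp' | rfl
              · exact h2 p hp1 hp'
              · simpa using hbad)
    · rw [pvReach, dif_neg (by omega)]
      exact pvFoldMax_init _ _ _

lemma pvMain (s : String) (k m target t : Int)
    (hk : 0 ≤ k) (hm : 0 ≤ m) (ht : 0 ≤ target) (htt : 0 ≤ t) :
    sliding_multi s k m target t = sliding_multi_alt s k m target t := by
  rw [pvA_eq s k m target t hk hm ht htt, pvB_eq s k m target t]
  set cs := s.toList with hcs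
  set n := cs.length with hn
  apply le_antisymm
  · apply pvFoldMax_le (fun p => (p : Int) + 1 - (pvLx cs k m target t (p + 1) : Int))
      (List.range n) 0 _ (pvFoldMax_init _ _ _)
    intro p hp
    have hpn : p < n := List.mem_range.mp hp
    set L := pvLx cs k m target t (p + 1) with hL
    have hLb : L ≤ p + 1 := pvLx_le cs k m target t (p + 1)
    by_cases hLp : L = p + 1
    · have : (p : Int) + 1 - (L : Int) = 0 := by
        rw [hLp]
        push_cast
        ring
      rw [this]
      exact pvFoldMax_init _ _ _
    · have hLle : L ≤ p := by omega
      have hvalid := pvLx_valid cs k m target t (p + 1)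
      refine le_trans (pvReach_ge cs k m target t L L p le_rfl hLle hpn ?_) ?_
      · intro p' hp1 hp2
        exact hvalid p' (by omega) hp1
      · exact pvFoldMax_mem _ (List.range n) 0 L (List.mem_range.mpr (by omega))
  · apply pvFoldMax_le (fun l => pvReach cs k m target t l l)
      (List.range n) 0 _ (pvFoldMax_init _ _ _)
    intro l _
    exact pvReach_le cs k m target t l l le_rfl (fun p hp1 hp2 => by omega)

-- ===== VERDICT (by name: the statement is the Claim_ definition above) =====
theorem sliding_multi_spec : Claim_equal_sliding_multi := by
  intro s k m target t _ hpre
  unfold Spec_sliding_multi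
  rcases hpre with hs | ⟨hk, hm, ht, htt⟩
  · subst hs
    rfl
  · exact pvMain s k m target t hk hm ht htt
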